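-- pv_equiv track=rewrite | github.com/bc-writings/drafts | math/arithmetic/product-cons-int-&-int-num-pigeon-hole/coding/pigeon-hole.py | sf_coef
-- ===== SOURCE A (Python) =====
-- def sf_coef(candidates):
--     if not candidates:
--         return set()
--
--
--     coefs = set([a := candidates.pop()])
--
--     for b in sf_coef(candidates):
--         if a != 1:
--             coefs.add(b)
--
--         coefs.add(a*b)
--
--     return coefs
-- ===== SOURCE B (Python) =====
-- def sf_coef(candidates):
--     coefs = set()
--     while candidates:
--         a = candidates.pop()
--         coefs = coefs | {a} | {a * b for b in coefs}
--     return coefs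
-- ===== Notes on version B (the rewrite author's own statement) =====
-- stated objective: simpler
-- what changed: Replaces A's recursion (pop one element, recurse on the rest, then interleave adds with a special case for a == 1) by a single iterative loop that pops each element and folds it into the accumulated set via a three-way union, with no recursion and no a != 1 branch.
import Mathlib
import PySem

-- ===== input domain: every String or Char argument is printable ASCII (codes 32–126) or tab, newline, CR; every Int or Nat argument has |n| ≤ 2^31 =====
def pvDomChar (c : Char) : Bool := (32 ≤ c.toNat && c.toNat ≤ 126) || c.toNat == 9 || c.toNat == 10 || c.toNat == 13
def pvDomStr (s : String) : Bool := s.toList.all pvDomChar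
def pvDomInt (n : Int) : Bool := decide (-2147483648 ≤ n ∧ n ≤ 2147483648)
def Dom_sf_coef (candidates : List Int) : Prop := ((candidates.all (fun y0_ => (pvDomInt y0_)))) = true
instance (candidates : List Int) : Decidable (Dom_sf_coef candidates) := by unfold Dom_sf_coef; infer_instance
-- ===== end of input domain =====

-- B replaces A's recursion by one iterative pop/union loop (simpler; no recursion, no `a != 1` branch).
-- Both Pythons empty `candidates` in place via pop(); the equivalence proved here is about the RETURN value.

-- ===== PORT A =====
-- `candidates.pop()` removes the LAST element and the recursion continues on what is left,
-- so the elements are visited in exactly the order of `candidates.reverse`; pvAGo transcribes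
-- A's body with the popped element at the head of the reversed list.
def pvAGo : List Int → List Int
  | [] => []                                     -- `if not candidates: return set()`
  | a :: rest =>                                 -- `a := candidates.pop()`; rest = what remains
      (pvAGo rest).foldl                         -- `for b in sf_coef(candidates):`
        (fun coefs b =>
          PySem.Set.add                          -- `coefs.add(a*b)`
            (if a ≠ 1 then PySem.Set.add coefs b else coefs)   -- `if a != 1: coefs.add(b)`
            (a * b))
        (PySem.Set.ofList [a])                   -- `coefs = set([a])`

def sf_coef (candidates : List Int) : List Int := pvAGo candidates.reverse

-- ===== PORT B =====
-- the while loop pops the last element each iteration, i.e. walks `candidates.reverse`;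
-- `coefs | {a} | {a*b for b in coefs}` = add a, then add each product in coefs's order.
def pvBGo : List Int → List Int → List Int
  | [], coefs => coefs                           -- `while candidates:` exhausted
  | a :: rest, coefs =>                          -- `a = candidates.pop()`
      pvBGo rest
        ((coefs.map (fun b => a * b)).foldl PySem.Set.add (PySem.Set.add coefs a))

def sf_coef_alt (candidates : List Int) : List Int := pvBGo candidates.reverse []

-- ===== PRECONDITION & SPEC =====
def Spec_sf_coef (candidates : List Int) (out : List Int) : Prop := out = sf_coef_alt candidates
instance (candidates : List Int) (out : List Int) : Decidable (Spec_sf_coef candidates out) := by unfold Spec_sf_coef; infer_instance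

-- ===== CLAIM (what is proved, stated in full; the proofs are below) =====
def Claim_equal_sf_coef : Prop := ∀ (candidates : List Int), Dom_sf_coef candidates → Spec_sf_coef candidates (sf_coef candidates)

-- ===== LEMMAS AND PROOFS =====

-- uninterleaved "raw" element streams of one A-step / one B-step (dedup deferred to a final fold)
def pvRawA (a : Int) (X : List Int) : List Int := a :: X.flatMap (fun b => [b, a * b])
def pvRawB (a : Int) (X : List Int) : List Int := X ++ a :: X.map (fun b => a * b)

def pvCA : List Int → List Int
  | [] => []
  | a :: r => pvRawA a (pvCA r)

def pvTB : List Int → List Int → List Int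
  | [], X => X
  | a :: r, X => pvTB r (pvRawB a X)

-- U s xs = fold Set.add: append the not-yet-present elements of xs, in order
theorem pv_mem_U (s xs : List Int) (y : Int) :
    y ∈ xs.foldl PySem.Set.add s ↔ y ∈ s ∨ y ∈ xs := by
  induction xs generalizing s with
  | nil => simp
  | cons x xs ih =>
      simp only [List.foldl_cons, ih, PySem.Set.mem_add, List.mem_cons]
      tauto

theorem pv_U_absorb (s ys : List Int) (h : ∀ y ∈ ys, y ∈ s) :
    ys.foldl PySem.Set.add s = s := by
  induction ys with
  | nil => rfl
  | cons y ys ih =>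
      simp only [List.foldl_cons, PySem.Set.add_of_mem (h y (by simp))]
      exact ih fun z hz => h z (by simp [hz])

theorem pv_add_add_self (s : List Int) (b : Int) :
    PySem.Set.add (PySem.Set.add s b) b = PySem.Set.add s b := by
  exact PySem.Set.add_of_mem (by simp [PySem.Set.mem_add])

-- deduplicating X before mapping each element to a block f b changes nothing under the final fold
theorem pv_dedup_flatMap (f : Int → List Int) (X : List Int) :
    ∀ (S s : List Int),
      ((X.foldl PySem.Set.add S).flatMap f).foldl PySem.Set.add s
        = (S.flatMap f ++ X.flatMap f).foldl PySem.Set.add s := by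
  induction X with
  | nil => intro S s; simp
  | cons b X ih =>
      intro S s
      simp only [List.foldl_cons, List.flatMap_cons]
      rw [ih]
      by_cases hb : b ∈ S
      · rw [PySem.Set.add_of_mem hb]
        rw [show S.flatMap f ++ (f b ++ X.flatMap f) = (S.flatMap f ++ f b) ++ X.flatMap f by
              simp [List.append_assoc]]
        rw [List.foldl_append, List.foldl_append, List.foldl_append]
        congr 1
        exact (pv_U_absorb _ _ fun y hy =>
          (pv_mem_U s (S.flatMap f) y).mpr (Or.inr (List.mem_flatMap.mpr ⟨b, hb, hy⟩))).symm
      · rw [PySem.Set.add_of_not_mem hb]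
        simp [List.append_assoc]

-- one A-step on a deduplicated state = dedup-fold of the raw A-stream
theorem pv_foldA_eq (a : Int) (S init : List Int) :
    S.foldl (fun coefs b =>
        PySem.Set.add (if a ≠ 1 then PySem.Set.add coefs b else coefs) (a * b)) init
      = (S.flatMap (fun b => [b, a * b])).foldl PySem.Set.add init := by
  induction S generalizing init with
  | nil => rfl
  | cons b S ih =>
      simp only [List.foldl_cons, List.flatMap_cons, List.foldl_append, List.foldl_nil]
      rw [ih]
      congr 1
      by_cases h1 : a = 1
      · subst h1; simp only [ne_eq, not_true_eq_false, if_false, one_mul, pv_add_add_self]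
      · simp [h1]

theorem pv_bridgeA (a : Int) (X : List Int) :
    (X.foldl PySem.Set.add []).foldl (fun coefs b =>
        PySem.Set.add (if a ≠ 1 then PySem.Set.add coefs b else coefs) (a * b))
        (PySem.Set.ofList [a])
      = (pvRawA a X).foldl PySem.Set.add [] := by
  rw [pv_foldA_eq, pv_dedup_flatMap]
  simp [pvRawA, PySem.Set.ofList]

theorem pv_bridgeB (a : Int) (X : List Int) :
    (((X.foldl PySem.Set.add []).map (fun b => a * b)).foldl PySem.Set.add
        (PySem.Set.add (X.foldl PySem.Set.add []) a))
      = (pvRawB a X).foldl PySem.Set.add [] := by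
  have hmap : ∀ (L s : List Int),
      (L.map (fun b => a * b)).foldl PySem.Set.add s
        = (L.flatMap (fun b => [a * b])).foldl PySem.Set.add s := by
    intro L s; induction L generalizing s with
    | nil => rfl
    | cons x L ih => simp only [List.map_cons, List.flatMap_cons, List.foldl_cons,
        List.foldl_append, List.foldl_nil]; exact ih _
  have key := pv_dedup_flatMap (fun b => [a * b]) X []
    (PySem.Set.add (X.foldl PySem.Set.add []) a)
  rw [hmap, key]
  simp [pvRawB, List.foldl_append, hmap]

-- the two raw steps commute literally (integer multiplication is commutative/associative)
theorem pv_rawComm (a x : Int) (X : List Int) :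
    pvRawA a (pvRawB x X) = pvRawB x (pvRawA a X) := by
  simp [pvRawA, pvRawB, List.map_flatMap, List.flatMap_map, mul_comm, mul_left_comm]

theorem pv_rawA_TB (a : Int) (r : List Int) : ∀ X, pvRawA a (pvTB r X) = pvTB r (pvRawA a X) := by
  induction r with
  | nil => intro X; rfl
  | cons x r ih => intro X; simp only [pvTB]; rw [ih, pv_rawComm]

theorem pv_CA_eq_TB (r : List Int) : pvCA r = pvTB r [] := by
  induction r with
  | nil => rfl
  | cons a r ih =>
      simp only [pvCA, pvTB]
      rw [ih, pv_rawA_TB]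
      rfl

theorem pv_ago_raw (r : List Int) : pvAGo r = (pvCA r).foldl PySem.Set.add [] := by
  induction r with
  | nil => rfl
  | cons a r ih =>
      simp only [pvAGo, pvCA]
      rw [ih, pv_bridgeA]

theorem pv_bgo_raw (r : List Int) : ∀ X, pvBGo r (X.foldl PySem.Set.add []) = (pvTB r X).foldl PySem.Set.add [] := by
  induction r with
  | nil => intro X; rfl
  | cons a r ih =>
      intro X
      simp only [pvBGo, pvTB]
      rw [pv_bridgeB a X, ih (pvRawB a X)]

-- ===== VERDICT (by name: the statement is the Claim_ definition above) =====
theorem sf_coef_spec : Claim_equal_sf_coef := by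
  intro candidates _
  unfold Spec_sf_coef sf_coef sf_coef_alt
  rw [pv_ago_raw, pv_CA_eq_TB]
  have := pv_bgo_raw candidates.reverse []
  simpa using this.symm
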